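-- pv_equiv track=rewrite | github.com/SerenaFraD/UNI-PA | CopiaStringa.py | copyUpTo
-- ===== SOURCE A (Python) =====
-- def copyUpTo(l, x):
--     if(len(l) == 0):
--         return l[:]
--     else:
--         if(l[len(l)-1] != x):
--             return copyUpTo(l[0:len(l)-1], x) + l[len(l)-1:len(l)]
--         else:
--             return l[len(l):len(l)+1]
-- ===== SOURCE B (Python) =====
-- def copyUpTo(l, x):
--     out = []
--     for v in reversed(l):
--         if v == x:
--             break
--         out.append(v)
--     out.reverse()
--     return out
-- ===== Notes on version B (the rewrite author's own statement) =====
-- stated objective: faster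
-- what changed: Replaces A's recursion that rebuilds a shorter copy of the list at every step (quadratic slicing/concatenation) with a single backward scan that collects the suffix before the last occurrence of x and reverses it once.
import Mathlib
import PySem

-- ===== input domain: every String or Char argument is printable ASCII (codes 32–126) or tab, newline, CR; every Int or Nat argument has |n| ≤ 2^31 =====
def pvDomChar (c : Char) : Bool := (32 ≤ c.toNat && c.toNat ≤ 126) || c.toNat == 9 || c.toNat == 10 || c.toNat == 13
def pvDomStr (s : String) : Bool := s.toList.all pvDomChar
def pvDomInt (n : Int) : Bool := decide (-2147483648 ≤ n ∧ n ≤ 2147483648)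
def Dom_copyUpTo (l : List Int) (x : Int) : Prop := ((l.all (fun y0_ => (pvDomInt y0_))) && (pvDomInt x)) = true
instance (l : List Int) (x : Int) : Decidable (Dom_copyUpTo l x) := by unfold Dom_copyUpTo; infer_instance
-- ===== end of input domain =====

-- B replaces A's end-recursion with its quadratic slice-and-concatenate by a single
-- backward scan collecting the suffix after the last occurrence of x (objective: faster).

-- ===== PORT A =====
-- literal transliteration of A: peel the last element with slices, recurse on l[0:len-1]
def copyUpTo (l : List Int) (x : Int) : List Int :=
  if l.length = 0 then
    PySem.List.slice l none none
  else
    if PySem.List.pyGet? l ((l.length : Int) - 1) ≠ some x then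
      copyUpTo (PySem.List.slice l (some 0) (some ((l.length : Int) - 1))) x
        ++ PySem.List.slice l (some ((l.length : Int) - 1)) (some (l.length : Int))
    else
      PySem.List.slice l (some (l.length : Int)) (some ((l.length : Int) + 1))
termination_by l.length
decreasing_by
  simp only [PySem.List.slice_zero_start]
  rename_i h _
  rw [PySem.List.slice_to _ (by omega)]
  simp only [List.length_take]
  omega

-- ===== PORT B =====
-- loop of Source B: walk reversed(l), append until v == x (break), then reverse the accumulator
def copyUpToGo (x : Int) (out : List Int) : List Int → List Int
  | [] => out
  | v :: rest => if v = x then out else copyUpToGo x (out ++ [v]) rest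

def copyUpTo_alt (l : List Int) (x : Int) : List Int :=
  (copyUpToGo x [] l.reverse).reverse

-- ===== PRECONDITION & SPEC =====
def Spec_copyUpTo (l : List Int) (x : Int) (out : List Int) : Prop := out = copyUpTo_alt l x
instance (l : List Int) (x : Int) (out : List Int) : Decidable (Spec_copyUpTo l x out) := by unfold Spec_copyUpTo; infer_instance

-- ===== CLAIM (what is proved, stated in full; the proofs are below) =====
def Claim_equal_copyUpTo : Prop := ∀ (l : List Int) (x : Int), Dom_copyUpTo l x → Spec_copyUpTo l x (copyUpTo l x)

-- ===== LEMMAS AND PROOFS =====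

-- the loop accumulates takeWhile (· ≠ x)
theorem copyUpToGo_eq (x : Int) (out rest : List Int) :
    copyUpToGo x out rest = out ++ rest.takeWhile (· ≠ x) := by
  induction rest generalizing out with
  | nil => simp [copyUpToGo]
  | cons v rest ih =>
    by_cases h : v = x
    · simp [copyUpToGo, h, List.takeWhile_cons]
    · simp [copyUpToGo, h, ih]

theorem copyUpTo_alt_eq (l : List Int) (x : Int) :
    copyUpTo_alt l x = (l.reverse.takeWhile (· ≠ x)).reverse := by
  simp [copyUpTo_alt, copyUpToGo_eq]

theorem copyUpTo_eq_alt (l : List Int) (x : Int) :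
    copyUpTo l x = copyUpTo_alt l x := by
  induction l using List.reverseRecOn with
  | nil =>
    unfold copyUpTo
    simp [copyUpTo_alt, copyUpToGo]
  | append_singleton ys a ih =>
    unfold copyUpTo
    have hlen : (ys ++ [a]).length = ys.length + 1 := by simp
    have hget : PySem.List.pyGet? (ys ++ [a]) (((ys ++ [a]).length : Int) - 1)
        = some a := by
      rw [hlen]
      have : ((ys.length + 1 : Nat) : Int) - 1 = (ys.length : Int) := by push_cast; omega
      rw [this]
      simp
    by_cases hax : a = x
    · -- last element is x: A returns the empty slice, B returns []
      rw [if_neg (by omega)]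
      rw [if_neg (by simp [hget, hax])]
      rw [copyUpTo_alt_eq]
      have hslice : PySem.List.slice (ys ++ [a]) (some ((ys ++ [a]).length : Int))
          (some (((ys ++ [a]).length : Int) + 1)) = ([] : List Int) := by
        have : (((ys ++ [a]).length : Int) + 1) = (((ys ++ [a]).length + 1 : Nat) : Int) := by
          push_cast; ring
        rw [this, PySem.List.slice_natCast]
        simp
      rw [hslice]
      simp [hax]
    · -- last element ≠ x: A recurses on ys, B takes a and continues
      rw [if_neg (by omega)]
      rw [if_pos (by simp [hget, hax])]
      have hdrop : PySem.List.slice (ys ++ [a]) (some 0)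
          (some (((ys ++ [a]).length : Int) - 1)) = ys := by
        simp only [PySem.List.slice_zero_start]
        rw [hlen]
        have : ((ys.length + 1 : Nat) : Int) - 1 = (ys.length : Int) := by push_cast; omega
        rw [this, PySem.List.slice_to_natCast]
        simp
      have hlast : PySem.List.slice (ys ++ [a]) (some (((ys ++ [a]).length : Int) - 1))
          (some ((ys ++ [a]).length : Int)) = [a] := by
        rw [hlen]
        have h1 : ((ys.length + 1 : Nat) : Int) - 1 = (ys.length : Int) := by push_cast; omega
        rw [h1, PySem.List.slice_natCast]
        simp
      rw [hdrop, hlast, ih, copyUpTo_alt_eq, copyUpTo_alt_eq]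
      simp [hax]

-- ===== VERDICT (by name: the statement is the Claim_ definition above) =====
theorem copyUpTo_spec : Claim_equal_copyUpTo := by
  intro l x _
  exact copyUpTo_eq_alt l x
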